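-- pv_equiv track=rewrite | github.com/Ayush-2802/Practice | TCS_CODEVITA/five.py | find_band_path
-- ===== SOURCE A (Python) =====
-- def get_next_position(x, y, direction):
--     if direction == 'u':
--         return x-1, y
--     elif direction == 'd':
--         return x+1, y
--     elif direction == 'l':
--         return x, y-1
--     else:
--         return x, y+1
--
-- def find_band_path(start_x, start_y, moves, grid_size):
--     visited_cells = []
--     x, y = start_x, start_y
--     visited_cells.append((x, y))
--
--     for step in moves:
--         x, y = get_next_position(x, y, step)
--         if x < 0 or x >= grid_size or y < 0 or y >= grid_size:
--             return None
--         visited_cells.append((x, y))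
--
--     return visited_cells
-- ===== SOURCE B (Python) =====
-- def find_band_path(start_x, start_y, moves, grid_size):
--     # Stage 1: running counts of 'u'/'d'/'l' moves (everything else acts as 'r').
--     counts = [(0, 0, 0)]
--     u = d = l = 0
--     for c in moves:
--         u += (c == 'u'); d += (c == 'd'); l += (c == 'l')
--         counts.append((u, d, l))
--     # Stage 2: each cell in closed form from the prefix counts (no stepping).
--     path = [(start_x + d - u, start_y + (i - u - d - l) - l)
--             for i, (u, d, l) in enumerate(counts)]
--     # Stage 3: aggregate bounds check on the cells after the start via min/max.
--     tail = path[1:]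
--     if tail:
--         xs = [p[0] for p in tail]
--         ys = [p[1] for p in tail]
--         if min(xs) < 0 or max(xs) >= grid_size or min(ys) < 0 or max(ys) >= grid_size:
--             return None
--     return path
-- ===== Notes on version B (the rewrite author's own statement) =====
-- stated objective: alternative
-- what changed: Replaces the cell-by-cell stepping walk with per-step early return by three staged passes: prefix counts of u/d/l, each cell computed in closed form from its prefix counts (no cell depends on the previous cell), and a single aggregate min/max bounds test over the tail instead of a per-cell check.
import Mathlib
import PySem

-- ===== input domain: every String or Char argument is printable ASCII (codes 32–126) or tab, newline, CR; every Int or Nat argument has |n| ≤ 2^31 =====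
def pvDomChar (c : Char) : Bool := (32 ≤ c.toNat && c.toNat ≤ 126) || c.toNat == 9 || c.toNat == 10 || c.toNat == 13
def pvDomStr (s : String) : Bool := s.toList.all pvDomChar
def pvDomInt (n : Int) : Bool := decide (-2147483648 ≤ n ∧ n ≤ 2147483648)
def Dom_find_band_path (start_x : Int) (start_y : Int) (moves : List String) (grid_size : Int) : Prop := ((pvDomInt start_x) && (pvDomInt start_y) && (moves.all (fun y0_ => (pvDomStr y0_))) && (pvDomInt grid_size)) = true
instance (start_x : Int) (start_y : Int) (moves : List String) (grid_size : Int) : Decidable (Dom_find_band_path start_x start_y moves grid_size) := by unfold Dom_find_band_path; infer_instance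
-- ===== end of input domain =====

-- B replaces A's stepping walk (per-move early return) by staged passes: prefix counts
-- of u/d/l, each cell in closed form from its counts, and one aggregate min/max bounds
-- test over the tail (objective: alternative).

-- ===== PORT A =====
def get_next_position (x : Int) (y : Int) (direction : String) : Int × Int :=
  if direction = "u" then (x - 1, y)
  else if direction = "d" then (x + 1, y)
  else if direction = "l" then (x, y - 1)
  else (x, y + 1)

def find_band_path_loop (x : Int) (y : Int) (moves : List String) (grid_size : Int)
    (visited_cells : List (Int × Int)) : Option (List (Int × Int)) :=
  match moves with
  | [] => some visited_cells
  | step :: rest =>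
    let p := get_next_position x y step
    if p.1 < 0 ∨ p.1 ≥ grid_size ∨ p.2 < 0 ∨ p.2 ≥ grid_size then none
    else find_band_path_loop p.1 p.2 rest grid_size (visited_cells ++ [p])

def find_band_path (start_x : Int) (start_y : Int) (moves : List String) (grid_size : Int) : Option (List (Int × Int)) :=
  find_band_path_loop start_x start_y moves grid_size [(start_x, start_y)]

-- ===== PORT B =====
-- the counting loop of Source B (state: counts list so far, running u, d, l)
def pvCountStep (st : List (Int × Int × Int) × Int × Int × Int) (c : String) :
    List (Int × Int × Int) × Int × Int × Int :=
  let u := st.2.1 + (if c = "u" then 1 else 0)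
  let d := st.2.2.1 + (if c = "d" then 1 else 0)
  let l := st.2.2.2 + (if c = "l" then 1 else 0)
  (st.1 ++ [(u, d, l)], u, d, l)

-- cell i in closed form from its prefix counts (the comprehension's body)
def pvCell (sx sy : Int) (p : Int × Int × Int × Int) : Int × Int :=
  (sx + p.2.2.1 - p.2.1, sy + (p.1 - p.2.1 - p.2.2.1 - p.2.2.2) - p.2.2.2)

def find_band_path_alt (start_x : Int) (start_y : Int) (moves : List String) (grid_size : Int) : Option (List (Int × Int)) :=
  let counts := (moves.foldl pvCountStep ([(0, 0, 0)], 0, 0, 0)).1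
  let path := (PySem.List.enumerate counts).map (pvCell start_x start_y)
  let tail := path.drop 1
  if tail = [] then some path
  else
    let xs := tail.map Prod.fst
    let ys := tail.map Prod.snd
    match PySem.List.min? xs (fun v => v), PySem.List.max? xs (fun v => v),
          PySem.List.min? ys (fun v => v), PySem.List.max? ys (fun v => v) with
    | some mnx, some mxx, some mny, some mxy =>
        if mnx < 0 ∨ mxx ≥ grid_size ∨ mny < 0 ∨ mxy ≥ grid_size then none else some path
    | _, _, _, _ => some path  -- unreachable: min/max of a nonempty list
  -- `path[1:]` is ported as `drop 1`; min/max with no key is PySem.List.min?/max? with identity key.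

-- ===== PRECONDITION & SPEC =====
def Spec_find_band_path (start_x : Int) (start_y : Int) (moves : List String) (grid_size : Int) (out : Option (List (Int × Int))) : Prop := out = find_band_path_alt start_x start_y moves grid_size
instance (start_x : Int) (start_y : Int) (moves : List String) (grid_size : Int) (out : Option (List (Int × Int))) : Decidable (Spec_find_band_path start_x start_y moves grid_size out) := by unfold Spec_find_band_path; infer_instance

-- ===== CLAIM =====
def Claim_equal_find_band_path : Prop := ∀ (start_x : Int) (start_y : Int) (moves : List String) (grid_size : Int), Dom_find_band_path start_x start_y moves grid_size → Spec_find_band_path start_x start_y moves grid_size (find_band_path start_x start_y moves grid_size)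

-- ===== LEMMAS AND PROOFS =====

-- proof-side: the stepped cells after the start
def pvStepTail (cur : Int × Int) (moves : List String) : List (Int × Int) :=
  match moves with
  | [] => []
  | s :: rest =>
    let p := get_next_position cur.1 cur.2 s
    p :: pvStepTail p rest

def pvBad (grid_size : Int) (c : Int × Int) : Bool :=
  decide (c.1 < 0 ∨ c.1 ≥ grid_size ∨ c.2 < 0 ∨ c.2 ≥ grid_size)

theorem pv_loop_eq (grid_size : Int) :
    ∀ (moves : List String) (x y : Int) (acc : List (Int × Int)),
    find_band_path_loop x y moves grid_size acc =
      (if (pvStepTail (x, y) moves).any (pvBad grid_size) then none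
       else some (acc ++ pvStepTail (x, y) moves)) := by
  intro moves
  induction moves with
  | nil => intro x y acc; simp [find_band_path_loop, pvStepTail]
  | cons s rest ih =>
    intro x y acc
    simp only [find_band_path_loop, pvStepTail, List.any_cons]
    by_cases hb : ((get_next_position x y s).1 < 0 ∨ (get_next_position x y s).1 ≥ grid_size ∨
        (get_next_position x y s).2 < 0 ∨ (get_next_position x y s).2 ≥ grid_size)
    · simp [hb, pvBad]
    · have hbad : pvBad grid_size (get_next_position x y s) = false := by
        simp [pvBad, hb]
      simp only [hb, if_false, ih, hbad, Bool.false_or]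
      split_ifs with h
      · rfl
      · simp

-- the counts fold, peeled off its list accumulator
def pvTailCounts (u d l : Int) : List String → List (Int × Int × Int)
  | [] => []
  | c :: rest =>
    let u' := u + (if c = "u" then 1 else 0)
    let d' := d + (if c = "d" then 1 else 0)
    let l' := l + (if c = "l" then 1 else 0)
    (u', d', l') :: pvTailCounts u' d' l' rest

theorem pv_fold_counts :
    ∀ (moves : List String) (acc : List (Int × Int × Int)) (u d l : Int),
    moves.foldl pvCountStep (acc, u, d, l) = (acc ++ pvTailCounts u d l moves,
      (moves.foldl pvCountStep (acc, u, d, l)).2) := by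
  intro moves
  induction moves with
  | nil => intro acc u d l; simp [pvTailCounts]
  | cons c rest ih =>
    intro acc u d l
    simp only [List.foldl_cons, pvCountStep, pvTailCounts]
    rw [ih]
    simp

theorem pv_cells_eq (sx sy : Int) :
    ∀ (moves : List String) (u d l : Int) (k : Nat),
    (PySem.List.enumerate (pvTailCounts u d l moves) ((k : Int) + 1)).map (pvCell sx sy) =
      pvStepTail (sx + d - u, sy + ((k : Int) - u - d - l) - l) moves := by
  intro moves
  induction moves with
  | nil => intro u d l k; simp [pvTailCounts, pvStepTail]
  | cons c rest ih =>
    intro u d l k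
    by_cases h1 : c = "u"
    · subst h1
      simp only [pvTailCounts, pvStepTail, PySem.List.enumerate_cons, List.map_cons,
        get_next_position, String.reduceEq, reduceIte, List.cons.injEq, add_zero]
      refine ⟨by simp [pvCell, Prod.ext_iff]; omega, ?_⟩
      have h := ih (u + 1) d l (k + 1)
      rw [show ((k : Int) + 1 + 1) = ((k + 1 : Nat) : Int) + 1 by push_cast; ring] at *
      rw [show (sx + d - u - 1 : Int) = sx + d - (u + 1) by ring,
          show (sy + ((k : Int) - u - d - l) - l : Int)
            = sy + (((k + 1 : Nat) : Int) - (u + 1) - d - l) - l by push_cast; ring]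
      exact h
    · by_cases h2 : c = "d"
      · subst h2
        simp only [pvTailCounts, pvStepTail, PySem.List.enumerate_cons, List.map_cons,
          get_next_position, String.reduceEq, reduceIte, List.cons.injEq, add_zero]
        refine ⟨by simp [pvCell, Prod.ext_iff]; omega, ?_⟩
        have h := ih u (d + 1) l (k + 1)
        rw [show ((k : Int) + 1 + 1) = ((k + 1 : Nat) : Int) + 1 by push_cast; ring] at *
        rw [show (sx + d - u + 1 : Int) = sx + (d + 1) - u by ring,
            show (sy + ((k : Int) - u - d - l) - l : Int)
              = sy + (((k + 1 : Nat) : Int) - u - (d + 1) - l) - l by push_cast; ring]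
        exact h
      · by_cases h3 : c = "l"
        · subst h3
          simp only [pvTailCounts, pvStepTail, PySem.List.enumerate_cons, List.map_cons,
            get_next_position, String.reduceEq, reduceIte, List.cons.injEq, add_zero]
          refine ⟨by simp [pvCell, Prod.ext_iff]; omega, ?_⟩
          have h := ih u d (l + 1) (k + 1)
          rw [show ((k : Int) + 1 + 1) = ((k + 1 : Nat) : Int) + 1 by push_cast; ring] at *
          rw [show (sy + ((k : Int) - u - d - l) - l - 1 : Int)
            = sy + (((k + 1 : Nat) : Int) - u - d - (l + 1)) - (l + 1) by push_cast; ring]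
          exact h
        · simp only [pvTailCounts, pvStepTail, PySem.List.enumerate_cons, List.map_cons,
            get_next_position, if_neg h1, if_neg h2, if_neg h3, List.cons.injEq, add_zero]
          refine ⟨by simp [pvCell, Prod.ext_iff]; omega, ?_⟩
          have h := ih u d l (k + 1)
          rw [show ((k : Int) + 1 + 1) = ((k + 1 : Nat) : Int) + 1 by push_cast; ring] at *
          rw [show (sy + ((k : Int) - u - d - l) - l + 1 : Int)
            = sy + (((k + 1 : Nat) : Int) - u - d - l) - l by push_cast; ring]
          exact h

theorem pv_minmax (gs : Int) (S : List (Int × Int)) (mnx mxx mny mxy : Int)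
    (h1 : PySem.List.min? (S.map Prod.fst) (fun v => v) = some mnx)
    (h2 : PySem.List.max? (S.map Prod.fst) (fun v => v) = some mxx)
    (h3 : PySem.List.min? (S.map Prod.snd) (fun v => v) = some mny)
    (h4 : PySem.List.max? (S.map Prod.snd) (fun v => v) = some mxy) :
    (mnx < 0 ∨ mxx ≥ gs ∨ mny < 0 ∨ mxy ≥ gs) ↔ S.any (pvBad gs) = true := by
  constructor
  · intro h
    rcases h with h | h | h | h
    · obtain ⟨p, hp, he⟩ := List.mem_map.mp (PySem.List.min?_mem h1)
      exact List.any_eq_true.mpr ⟨p, hp, by simp [pvBad]; omega⟩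
    · obtain ⟨p, hp, he⟩ := List.mem_map.mp (PySem.List.max?_mem h2)
      exact List.any_eq_true.mpr ⟨p, hp, by simp [pvBad]; omega⟩
    · obtain ⟨p, hp, he⟩ := List.mem_map.mp (PySem.List.min?_mem h3)
      exact List.any_eq_true.mpr ⟨p, hp, by simp [pvBad]; omega⟩
    · obtain ⟨p, hp, he⟩ := List.mem_map.mp (PySem.List.max?_mem h4)
      exact List.any_eq_true.mpr ⟨p, hp, by simp [pvBad]; omega⟩
  · intro h
    obtain ⟨p, hp, hb⟩ := List.any_eq_true.mp h
    simp only [pvBad, decide_eq_true_eq] at hb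
    rcases hb with hb | hb | hb | hb
    · exact Or.inl (lt_of_le_of_lt (PySem.List.min?_isMin h1 p.1 (List.mem_map_of_mem hp)) hb)
    · exact Or.inr (Or.inl (le_trans hb (PySem.List.max?_isMax h2 p.1 (List.mem_map_of_mem hp))))
    · exact Or.inr (Or.inr (Or.inl
        (lt_of_le_of_lt (PySem.List.min?_isMin h3 p.2 (List.mem_map_of_mem hp)) hb)))
    · exact Or.inr (Or.inr (Or.inr
        (le_trans hb (PySem.List.max?_isMax h4 p.2 (List.mem_map_of_mem hp)))))

theorem pv_alt_eq (sx sy : Int) (moves : List String) (gs : Int) :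
    find_band_path_alt sx sy moves gs =
      (if (pvStepTail (sx, sy) moves).any (pvBad gs) then none
       else some ((sx, sy) :: pvStepTail (sx, sy) moves)) := by
  unfold find_band_path_alt
  have hc : (moves.foldl pvCountStep ([((0 : Int), (0 : Int), (0 : Int))], 0, 0, 0)).1
      = ((0 : Int), (0 : Int), (0 : Int)) :: pvTailCounts 0 0 0 moves := by
    rw [pv_fold_counts]
    rfl
  rw [hc]
  dsimp only
  have hpath : (PySem.List.enumerate (((0 : Int), (0 : Int), (0 : Int)) :: pvTailCounts 0 0 0 moves)).map
      (pvCell sx sy) = (sx, sy) :: pvStepTail (sx, sy) moves := by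
    have h0 := pv_cells_eq sx sy moves 0 0 0 0
    simp only [Nat.cast_zero, zero_add, sub_zero, add_zero] at h0
    simp [PySem.List.enumerate_cons, h0, pvCell]
  rw [hpath]
  simp only [List.drop_succ_cons, List.drop_zero]
  by_cases hS : pvStepTail (sx, sy) moves = []
  · simp [hS]
  · simp only [hS, if_false]
    cases h1 : PySem.List.min? ((pvStepTail (sx, sy) moves).map Prod.fst) (fun v => v) with
    | none => exact absurd (by simpa [PySem.List.min?_eq_none_iff] using h1) hS
    | some mnx =>
    cases h2 : PySem.List.max? ((pvStepTail (sx, sy) moves).map Prod.fst) (fun v => v) with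
    | none => exact absurd (by simpa [PySem.List.max?_eq_none_iff] using h2) hS
    | some mxx =>
    cases h3 : PySem.List.min? ((pvStepTail (sx, sy) moves).map Prod.snd) (fun v => v) with
    | none => exact absurd (by simpa [PySem.List.min?_eq_none_iff] using h3) hS
    | some mny =>
    cases h4 : PySem.List.max? ((pvStepTail (sx, sy) moves).map Prod.snd) (fun v => v) with
    | none => exact absurd (by simpa [PySem.List.max?_eq_none_iff] using h4) hS
    | some mxy =>
    have hiff := pv_minmax gs (pvStepTail (sx, sy) moves) mnx mxx mny mxy h1 h2 h3 h4
    by_cases hb : (pvStepTail (sx, sy) moves).any (pvBad gs) = true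
    · simp [hb, hiff.mpr hb]
    · have : ¬ (mnx < 0 ∨ mxx ≥ gs ∨ mny < 0 ∨ mxy ≥ gs) := fun h => hb (hiff.mp h)
      simp [hb, this]

-- ===== VERDICT =====
theorem find_band_path_spec : Claim_equal_find_band_path := by
  intro sx sy moves gs _
  unfold Spec_find_band_path find_band_path
  rw [pv_loop_eq, pv_alt_eq]
  simp
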